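-- pv_equiv track=rewrite | github.com/solisquesada/Proyecto_Grua_Micros | metodoPatron.py | verificarCantidades
-- ===== SOURCE A (Python) =====
-- def verificarCantidades(matrizPatron,matrizSuministro):
--     ADisponible = 0
--     BDisponible = 0
--     CDisponible = 0
--
--     # Se define la cantidad de objetos necesarios para el patron
--     for filaPatron in range(5):
--         for columnaPatron in range(5):
--             objeto = matrizPatron[filaPatron][columnaPatron]
--             if (objeto == 100):
--                 ADisponible = ADisponible + 1
--             elif (objeto == 200):
--                 BDisponible = BDisponible + 1
--             elif (objeto == 300):
--                 CDisponible = CDisponible + 1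
--     # Se repasa el material en el suministro para ver que
--     # concuerde con el material necesario.
--     for filaSuministro in range(5):
--         for columnaSuministro in range(5):
--             objeto = matrizSuministro[filaSuministro][columnaSuministro]
--             if (objeto == 100):
--                 ADisponible = ADisponible - 1
--             elif (objeto == 200):
--                 BDisponible = BDisponible - 1
--             elif (objeto == 300):
--                 CDisponible = CDisponible - 1
--     # Se verifica que el material sea exacto al cerrar en 0
--     if (ADisponible != 0 or BDisponible != 0 or CDisponible != 0):
--         print ("\nLa cantidad de materiales disponibles y necesitados no son iguales")
--         if (ADisponible > 0 or BDisponible > 0 or CDisponible > 0):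
--             Error = 203 # Se define el código 203 como error por exceso de material
--             return (Error)
--         else:
--             Error = 201 # Se define el código 201 como error por falta material
--             return (Error)
--     else:
--         print ("\nSe ha suministrado la cantidad correcta de material :)")
--         return (0)
-- ===== SOURCE B (Python) =====
-- def verificarCantidades(matrizPatron, matrizSuministro):
--     MATERIALES = (100, 200, 300)
--     necesitado = sorted(matrizPatron[i][j] for i in range(5) for j in range(5)
--                         if matrizPatron[i][j] in MATERIALES)
--     disponible = sorted(matrizSuministro[i][j] for i in range(5) for j in range(5)
--                         if matrizSuministro[i][j] in MATERIALES)
--     if necesitado == disponible: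
--         print("\nSe ha suministrado la cantidad correcta de material :)")
--         return 0
--     print("\nLa cantidad de materiales disponibles y necesitados no son iguales")
--     # merge scan over the two sorted lists: is every needed item available?
--     i = 0
--     for x in disponible:
--         if i < len(necesitado) and necesitado[i] == x:
--             i += 1
--     return 201 if i == len(necesitado) else 203
-- ===== Notes on version B (the rewrite author's own statement) =====
-- stated objective: alternative
-- what changed: Replaces A's per-material counter arithmetic entirely by a sort-then-merge-scan: B builds the sorted lists of material cells of each grid, returns 0 when the sorted lists are equal, and otherwise decides 201 vs 203 by a two-pointer sub-multiset scan of the two sorted lists (no counters or counts anywhere).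
import Mathlib
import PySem

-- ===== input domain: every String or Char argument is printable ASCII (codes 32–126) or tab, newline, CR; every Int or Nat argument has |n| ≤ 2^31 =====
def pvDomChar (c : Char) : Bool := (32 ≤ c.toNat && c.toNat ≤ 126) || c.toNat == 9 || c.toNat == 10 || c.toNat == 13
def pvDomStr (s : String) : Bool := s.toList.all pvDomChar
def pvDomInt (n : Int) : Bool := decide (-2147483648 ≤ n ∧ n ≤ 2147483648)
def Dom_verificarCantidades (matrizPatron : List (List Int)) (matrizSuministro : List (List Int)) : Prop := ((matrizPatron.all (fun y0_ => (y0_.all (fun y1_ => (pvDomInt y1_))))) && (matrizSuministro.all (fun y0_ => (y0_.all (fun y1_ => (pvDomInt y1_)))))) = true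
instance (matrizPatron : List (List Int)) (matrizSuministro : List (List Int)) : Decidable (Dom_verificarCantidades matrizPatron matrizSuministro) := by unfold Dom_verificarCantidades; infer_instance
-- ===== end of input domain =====

-- B replaces A's per-material counter arithmetic by a sort-then-merge-scan: sorted material-cell
-- lists compared for equality, mismatch classified by a two-pointer sub-multiset scan (alternative; same cost).


-- ===== PORT A =====
-- literal transliteration of A: two nested for-loops over range(5) with three counters, then the checks
def verificarCantidades (matrizPatron : List (List Int)) (matrizSuministro : List (List Int)) : Int :=
  let s1 : Int × Int × Int :=
    (PySem.List.pyRange 0 5 1).foldl (fun acc filaPatron =>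
      (PySem.List.pyRange 0 5 1).foldl (fun (acc : Int × Int × Int) columnaPatron =>
        if PySem.List.pyGetD (PySem.List.pyGetD matrizPatron filaPatron []) columnaPatron 0 = 100 then (acc.1 + 1, acc.2.1, acc.2.2)
        else if PySem.List.pyGetD (PySem.List.pyGetD matrizPatron filaPatron []) columnaPatron 0 = 200 then (acc.1, acc.2.1 + 1, acc.2.2)
        else if PySem.List.pyGetD (PySem.List.pyGetD matrizPatron filaPatron []) columnaPatron 0 = 300 then (acc.1, acc.2.1, acc.2.2 + 1)
        else acc) acc) ((0 : Int), (0 : Int), (0 : Int))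
  let s2 : Int × Int × Int :=
    (PySem.List.pyRange 0 5 1).foldl (fun acc filaSuministro =>
      (PySem.List.pyRange 0 5 1).foldl (fun (acc : Int × Int × Int) columnaSuministro =>
        if PySem.List.pyGetD (PySem.List.pyGetD matrizSuministro filaSuministro []) columnaSuministro 0 = 100 then (acc.1 - 1, acc.2.1, acc.2.2)
        else if PySem.List.pyGetD (PySem.List.pyGetD matrizSuministro filaSuministro []) columnaSuministro 0 = 200 then (acc.1, acc.2.1 - 1, acc.2.2)
        else if PySem.List.pyGetD (PySem.List.pyGetD matrizSuministro filaSuministro []) columnaSuministro 0 = 300 then (acc.1, acc.2.1, acc.2.2 - 1)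
        else acc) acc) s1
  if s2.1 ≠ 0 ∨ s2.2.1 ≠ 0 ∨ s2.2.2 ≠ 0 then
    if s2.1 > 0 ∨ s2.2.1 > 0 ∨ s2.2.2 > 0 then 203 else 201
  else 0

-- ===== PORT B =====
-- Source B's MATERIALES tuple
def pvMats : List Int := [100, 200, 300]

-- Source B's 'sorted(m[i][j] for i in range(5) for j in range(5) if m[i][j] in MATERIALES)'
def pvSortedMats (m : List (List Int)) : List Int :=
  PySem.List.sorted
    ((PySem.List.pyRange 0 5 1).flatMap (fun i =>
      (PySem.List.pyRange 0 5 1).filterMap (fun j =>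
        if PySem.List.pyGetD (PySem.List.pyGetD m i []) j 0 ∈ pvMats then
          some (PySem.List.pyGetD (PySem.List.pyGetD m i []) j 0)
        else none)))
    (fun x => x) false

-- Source B's merge-scan step: 'if i < len(necesitado) and necesitado[i] == x: i += 1'
def pvMergeStep (P : List Int) (i : Int) (x : Int) : Int :=
  if i < (P.length : Int) ∧ PySem.List.pyGetD P i 0 = x then i + 1 else i

def verificarCantidades_alt (matrizPatron : List (List Int)) (matrizSuministro : List (List Int)) : Int :=
  let necesitado := pvSortedMats matrizPatron
  let disponible := pvSortedMats matrizSuministro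
  if necesitado = disponible then 0
  else
    let i := disponible.foldl (pvMergeStep necesitado) 0
    if i = (necesitado.length : Int) then 201 else 203

-- ===== PRECONDITION & SPEC =====
-- Pre_ excludes exactly the inputs where Python A raises IndexError: both matrices need at
-- least 5 rows whose first 5 rows each have at least 5 columns.
def Pre_verificarCantidades (matrizPatron : List (List Int)) (matrizSuministro : List (List Int)) : Prop :=
  5 ≤ matrizPatron.length ∧ 5 ≤ matrizSuministro.length ∧
  (∀ r ∈ matrizPatron.take 5, 5 ≤ r.length) ∧ (∀ r ∈ matrizSuministro.take 5, 5 ≤ r.length)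
instance (matrizPatron : List (List Int)) (matrizSuministro : List (List Int)) : Decidable (Pre_verificarCantidades matrizPatron matrizSuministro) := by unfold Pre_verificarCantidades; infer_instance

def pvWitness_verificarCantidades : List (List Int) × List (List Int) :=
  ([[100,0,0,0,0],[0,0,0,0,0],[0,0,0,0,0],[0,0,0,0,0],[0,0,0,0,0]],
   [[0,0,0,0,0],[0,0,0,0,0],[0,0,0,0,0],[0,0,0,0,0],[0,0,0,0,100]])

def Spec_verificarCantidades (matrizPatron : List (List Int)) (matrizSuministro : List (List Int)) (out : Int) : Prop := out = verificarCantidades_alt matrizPatron matrizSuministro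
instance (matrizPatron : List (List Int)) (matrizSuministro : List (List Int)) (out : Int) : Decidable (Spec_verificarCantidades matrizPatron matrizSuministro out) := by unfold Spec_verificarCantidades; infer_instance

-- ===== CLAIM (what is proved, stated in full; the proofs are below) =====
def Claim_equal_verificarCantidades : Prop := ∀ (matrizPatron : List (List Int)) (matrizSuministro : List (List Int)), Dom_verificarCantidades matrizPatron matrizSuministro → Pre_verificarCantidades matrizPatron matrizSuministro → Spec_verificarCantidades matrizPatron matrizSuministro (verificarCantidades matrizPatron matrizSuministro)

-- ===== LEMMAS AND PROOFS =====

-- the flattened 5×5 cell list both programs traverse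
def pvCeldas (m : List (List Int)) : List Int :=
  (PySem.List.pyRange 0 5 1).flatMap (fun i =>
    (PySem.List.pyRange 0 5 1).map (fun j => PySem.List.pyGetD (PySem.List.pyGetD m i []) j 0))

-- the canonical sorted list with a 100s, b 200s, c 300s
def pvCanon (a b c : ℕ) : List Int :=
  List.replicate a 100 ++ List.replicate b 200 ++ List.replicate c 300

-- A's counting loop over any cell list adds per-material counts to the accumulator
theorem pvFoldAdd (l : List Int) (a b c : Int) :
    l.foldl (fun (acc : Int × Int × Int) x =>
      if x = 100 then (acc.1 + 1, acc.2.1, acc.2.2)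
      else if x = 200 then (acc.1, acc.2.1 + 1, acc.2.2)
      else if x = 300 then (acc.1, acc.2.1, acc.2.2 + 1)
      else acc) (a, b, c)
    = (a + (l.count 100 : Int), b + (l.count 200 : Int), c + (l.count 300 : Int)) := by
  induction l generalizing a b c with
  | nil => simp
  | cons x t ih =>
    simp only [List.foldl_cons, List.count_cons]
    by_cases h1 : x = 100 <;> by_cases h2 : x = 200 <;> by_cases h3 : x = 300 <;>
      simp [h1, h2, h3, ih, Prod.ext_iff] <;> omega

-- A's subtracting loop subtracts per-material counts
theorem pvFoldSub (l : List Int) (a b c : Int) :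
    l.foldl (fun (acc : Int × Int × Int) x =>
      if x = 100 then (acc.1 - 1, acc.2.1, acc.2.2)
      else if x = 200 then (acc.1, acc.2.1 - 1, acc.2.2)
      else if x = 300 then (acc.1, acc.2.1, acc.2.2 - 1)
      else acc) (a, b, c)
    = (a - (l.count 100 : Int), b - (l.count 200 : Int), c - (l.count 300 : Int)) := by
  induction l generalizing a b c with
  | nil => simp
  | cons x t ih =>
    simp only [List.foldl_cons, List.count_cons]
    by_cases h1 : x = 100 <;> by_cases h2 : x = 200 <;> by_cases h3 : x = 300 <;>
      simp [h1, h2, h3, ih, Prod.ext_iff] <;> omega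

-- A's nested range(5) loops traverse exactly the flattened cell list
theorem pvNestedEqCeldas (m : List (List Int)) (f : Int × Int × Int → Int → Int × Int × Int)
    (init : Int × Int × Int) :
    (PySem.List.pyRange 0 5 1).foldl (fun acc i =>
      (PySem.List.pyRange 0 5 1).foldl (fun acc j =>
        f acc (PySem.List.pyGetD (PySem.List.pyGetD m i []) j 0)) acc) init
    = (pvCeldas m).foldl f init := by
  simp [pvCeldas, List.foldl_flatMap, List.foldl_map]

-- the two nested 5×5 loops of A, as closed count expressions over the cell list
theorem pvAddLoop (m : List (List Int)) (init : Int × Int × Int) :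
    (PySem.List.pyRange 0 5 1).foldl (fun acc i =>
      (PySem.List.pyRange 0 5 1).foldl (fun (acc : Int × Int × Int) j =>
        if PySem.List.pyGetD (PySem.List.pyGetD m i []) j 0 = 100 then (acc.1 + 1, acc.2.1, acc.2.2)
        else if PySem.List.pyGetD (PySem.List.pyGetD m i []) j 0 = 200 then (acc.1, acc.2.1 + 1, acc.2.2)
        else if PySem.List.pyGetD (PySem.List.pyGetD m i []) j 0 = 300 then (acc.1, acc.2.1, acc.2.2 + 1)
        else acc) acc) init
    = (init.1 + ((pvCeldas m).count 100 : Int), init.2.1 + ((pvCeldas m).count 200 : Int),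
       init.2.2 + ((pvCeldas m).count 300 : Int)) := by
  obtain ⟨a, b, c⟩ := init
  rw [pvNestedEqCeldas m (fun (acc : Int × Int × Int) x =>
        if x = 100 then (acc.1 + 1, acc.2.1, acc.2.2)
        else if x = 200 then (acc.1, acc.2.1 + 1, acc.2.2)
        else if x = 300 then (acc.1, acc.2.1, acc.2.2 + 1)
        else acc) (a, b, c), pvFoldAdd]

theorem pvSubLoop (m : List (List Int)) (init : Int × Int × Int) :
    (PySem.List.pyRange 0 5 1).foldl (fun acc i =>
      (PySem.List.pyRange 0 5 1).foldl (fun (acc : Int × Int × Int) j =>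
        if PySem.List.pyGetD (PySem.List.pyGetD m i []) j 0 = 100 then (acc.1 - 1, acc.2.1, acc.2.2)
        else if PySem.List.pyGetD (PySem.List.pyGetD m i []) j 0 = 200 then (acc.1, acc.2.1 - 1, acc.2.2)
        else if PySem.List.pyGetD (PySem.List.pyGetD m i []) j 0 = 300 then (acc.1, acc.2.1, acc.2.2 - 1)
        else acc) acc) init
    = (init.1 - ((pvCeldas m).count 100 : Int), init.2.1 - ((pvCeldas m).count 200 : Int),
       init.2.2 - ((pvCeldas m).count 300 : Int)) := by
  obtain ⟨a, b, c⟩ := init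
  rw [pvNestedEqCeldas m (fun (acc : Int × Int × Int) x =>
        if x = 100 then (acc.1 - 1, acc.2.1, acc.2.2)
        else if x = 200 then (acc.1, acc.2.1 - 1, acc.2.2)
        else if x = 300 then (acc.1, acc.2.1, acc.2.2 - 1)
        else acc) (a, b, c), pvFoldSub]

-- helper: a guard-comprehension filterMap is a filter of the mapped list
theorem pvFilterMapAux (l : List Int) (g : Int → Int) :
    l.filterMap (fun j => if g j ∈ pvMats then some (g j) else none)
    = (l.map g).filter (fun x => decide (x ∈ pvMats)) := by
  induction l with
  | nil => simp
  | cons j t ih =>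
    by_cases h : g j ∈ pvMats <;> simp [h, ih]

-- B's comprehension is the filter of the flattened cell list
theorem pvFilterCeldas (m : List (List Int)) :
    (PySem.List.pyRange 0 5 1).flatMap (fun i =>
      (PySem.List.pyRange 0 5 1).filterMap (fun j =>
        if PySem.List.pyGetD (PySem.List.pyGetD m i []) j 0 ∈ pvMats then
          some (PySem.List.pyGetD (PySem.List.pyGetD m i []) j 0)
        else none))
    = (pvCeldas m).filter (fun x => decide (x ∈ pvMats)) := by
  simp only [pvCeldas, List.filter_flatMap, pvFilterMapAux]

-- counts of the canonical list
theorem pvCanonCount (a b c : ℕ) :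
    (pvCanon a b c).count 100 = a ∧ (pvCanon a b c).count 200 = b ∧
    (pvCanon a b c).count 300 = c := by
  simp [pvCanon, List.count_append, List.count_replicate]

-- sorting a list of materials yields the canonical list
theorem pvSortCanon (l : List Int) (h : ∀ x ∈ l, x = 100 ∨ x = 200 ∨ x = 300) :
    PySem.List.sorted l (fun x => x) false = pvCanon (l.count 100) (l.count 200) (l.count 300) := by
  apply PySem.List.sorted_id_eq_of_perm_of_pairwise
  · rw [List.perm_iff_count]
    intro v
    by_cases h1 : v = 100
    · simp [h1, pvCanon, List.count_append, List.count_replicate]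
    by_cases h2 : v = 200
    · simp [h2, pvCanon, List.count_append, List.count_replicate]
    by_cases h3 : v = 300
    · simp [h3, pvCanon, List.count_append, List.count_replicate]
    · rw [List.count_eq_zero.mpr, List.count_eq_zero.mpr]
      · intro hv; rcases h v hv with h' | h' | h' <;> exact absurd h' (by assumption)
      · simp [pvCanon, List.mem_append, List.mem_replicate]
        tauto
  · simp only [pvCanon]
    simp [List.pairwise_append, List.pairwise_replicate, List.mem_replicate, List.mem_append]
    omega

-- element characterization of the canonical list
theorem pvCanonGetD (a b c k : ℕ) (hk : k < a + b + c) :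
    (pvCanon a b c).getD k 0 = if k < a then 100 else if k < a + b then 200 else 300 := by
  have hlen : (pvCanon a b c).length = a + b + c := by simp [pvCanon]; omega
  rw [List.getD_eq_getElem _ _ (by omega)]
  simp only [pvCanon, List.getElem_append, List.length_append, List.length_replicate,
    List.getElem_replicate]
  split_ifs <;> omega

theorem pvCanonLen (a b c : ℕ) : (pvCanon a b c).length = a + b + c := by
  simp [pvCanon]; omega

-- stalled merge scan: a step that does not advance never advances on a replicate run
theorem pvMergeStall (P : List Int) (i x : Int) (n : ℕ) (h : pvMergeStep P i x = i) :
    (List.replicate n x).foldl (pvMergeStep P) i = i := by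
  induction n with
  | zero => simp
  | succ n ih => simp [List.replicate_succ, h, ih]

-- merge scan over a replicate run: advances by min of the run lengths
theorem pvMergeRun (P : List Int) (x : Int) (n : ℕ) :
    ∀ (i m : ℕ),
      (∀ k : ℕ, i ≤ k → k < i + m → k < P.length ∧ P.getD k 0 = x) →
      pvMergeStep P ((i + m : ℕ) : Int) x = ((i + m : ℕ) : Int) →
      (List.replicate n x).foldl (pvMergeStep P) ((i : ℕ) : Int) = ((i + min n m : ℕ) : Int) := by
  induction n with
  | zero => intro i m _ _; simp
  | succ n ih =>
    intro i m hadv hstop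
    cases m with
    | zero =>
      have hst : pvMergeStep P ((i : ℕ) : Int) x = ((i : ℕ) : Int) := by
        simpa using hstop
      rw [pvMergeStall P _ x _ hst]
      simp
    | succ m =>
      have hk := hadv i (le_refl i) (by omega)
      have hstep : pvMergeStep P ((i : ℕ) : Int) x = ((i + 1 : ℕ) : Int) := by
        unfold pvMergeStep
        rw [if_pos]
        · push_cast; ring
        · constructor
          · exact_mod_cast hk.1
          · rw [PySem.List.pyGetD_natCast]; exact hk.2
      rw [List.replicate_succ, List.foldl_cons, hstep]
      have := ih (i + 1) m (fun k hk1 hk2 => hadv k (by omega) (by omega))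
        (by rw [show i + 1 + m = i + (m + 1) from by omega]; exact hstop)
      rw [this]
      have h' : i + 1 + min n m = i + min (n + 1) (m + 1) := by omega
      exact_mod_cast congrArg (Nat.cast : ℕ → ℤ) h'

-- the full merge scan over canonical lists hits the length iff the needed multiset is contained
theorem pvMergeFull (a b c a' b' c' : ℕ) :
    ((pvCanon a' b' c').foldl (pvMergeStep (pvCanon a b c)) 0 = (((pvCanon a b c).length : ℕ) : Int))
      ↔ (a ≤ a' ∧ b ≤ b' ∧ c ≤ c') := by
  have hlen := pvCanonLen a b c
  have h100 : ∀ k : ℕ, 0 ≤ k → k < 0 + a →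
      k < (pvCanon a b c).length ∧ (pvCanon a b c).getD k 0 = 100 := by
    intro k _ hk
    refine ⟨by omega, ?_⟩
    rw [pvCanonGetD a b c k (by omega)]
    simp [show k < a by omega]
  have hstop100 : pvMergeStep (pvCanon a b c) ((0 + a : ℕ) : Int) 100 = ((0 + a : ℕ) : Int) := by
    unfold pvMergeStep
    rw [if_neg]
    rintro ⟨hlt, hget⟩
    rw [hlen] at hlt
    have hlt' : 0 + a < a + b + c := by exact_mod_cast hlt
    rw [PySem.List.pyGetD_natCast, pvCanonGetD a b c _ (by omega)] at hget
    simp at hget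
    split_ifs at hget <;> omega
  have run1 : (List.replicate a' (100 : Int)).foldl (pvMergeStep (pvCanon a b c)) ((0 : ℕ) : Int)
      = ((0 + min a' a : ℕ) : Int) := pvMergeRun _ 100 a' 0 a h100 hstop100
  rw [show pvCanon a' b' c' = (List.replicate a' (100 : Int) ++ List.replicate b' 200)
        ++ List.replicate c' 300 from rfl, List.foldl_append, List.foldl_append]
  by_cases ha : a ≤ a'
  · have h1 : min a' a = a := by omega
    rw [show ((0:Int)) = ((0 : ℕ) : Int) by simp, run1, h1]
    have h200 : ∀ k : ℕ, a ≤ k → k < a + b →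
        k < (pvCanon a b c).length ∧ (pvCanon a b c).getD k 0 = 200 := by
      intro k hk1 hk2
      refine ⟨by omega, ?_⟩
      rw [pvCanonGetD a b c k (by omega)]
      simp [show ¬ k < a by omega, show k < a + b by omega]
    have hstop200 : pvMergeStep (pvCanon a b c) ((a + b : ℕ) : Int) 200 = ((a + b : ℕ) : Int) := by
      unfold pvMergeStep
      rw [if_neg]
      rintro ⟨hlt, hget⟩
      rw [hlen] at hlt
      have hlt' : a + b < a + b + c := by exact_mod_cast hlt
      rw [PySem.List.pyGetD_natCast, pvCanonGetD a b c _ (by omega)] at hget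
      split_ifs at hget <;> omega
    have run2 : (List.replicate b' (200 : Int)).foldl (pvMergeStep (pvCanon a b c)) ((a : ℕ) : Int)
        = ((a + min b' b : ℕ) : Int) := pvMergeRun _ 200 b' a b h200 hstop200
    rw [show ((0 + a : ℕ) : Int) = ((a : ℕ) : Int) by simp, run2]
    by_cases hb : b ≤ b'
    · have h2 : min b' b = b := by omega
      rw [h2]
      have h300 : ∀ k : ℕ, a + b ≤ k → k < (a + b) + c →
          k < (pvCanon a b c).length ∧ (pvCanon a b c).getD k 0 = 300 := by
        intro k hk1 hk2
        refine ⟨by omega, ?_⟩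
        rw [pvCanonGetD a b c k (by omega)]
        simp [show ¬ k < a by omega, show ¬ k < a + b by omega]
      have hstop300 : pvMergeStep (pvCanon a b c) (((a + b) + c : ℕ) : Int) 300
          = (((a + b) + c : ℕ) : Int) := by
        unfold pvMergeStep
        rw [if_neg]
        rintro ⟨hlt, _⟩
        rw [hlen] at hlt
        have : a + b + c < a + b + c := by exact_mod_cast hlt
        omega
      have run3 : (List.replicate c' (300 : Int)).foldl (pvMergeStep (pvCanon a b c))
          ((a + b : ℕ) : Int) = (((a + b) + min c' c : ℕ) : Int) :=
        pvMergeRun _ 300 c' (a + b) c h300 hstop300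
      rw [run3, hlen]
      constructor
      · intro h
        have : (a + b) + min c' c = a + b + c := by exact_mod_cast h
        omega
      · intro ⟨_, _, hc⟩
        have h' : (a + b) + min c' c = a + b + c := by omega
        exact_mod_cast congrArg (Nat.cast : ℕ → ℤ) h'
    · -- b' < b: pointer stuck at a+b' (a 200 cell), never advances on 300s
      have h2 : min b' b = b' := by omega
      rw [h2]
      have hst : pvMergeStep (pvCanon a b c) ((a + b' : ℕ) : Int) 300 = ((a + b' : ℕ) : Int) := by
        unfold pvMergeStep
        rw [if_neg]
        rintro ⟨hlt, hget⟩
        rw [PySem.List.pyGetD_natCast, pvCanonGetD a b c _ (by rw [hlen] at hlt; exact_mod_cast hlt)] at hget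
        split_ifs at hget <;> omega
      rw [pvMergeStall _ _ _ _ hst, hlen]
      constructor
      · intro h
        have : a + b' = a + b + c := by exact_mod_cast h
        omega
      · intro ⟨_, hb', _⟩; omega
  · -- a' < a: pointer stuck at a' (a 100 cell), never advances on 200s or 300s
    have h1 : min a' a = a' := by omega
    rw [show ((0:Int)) = ((0 : ℕ) : Int) by simp, run1, h1]
    have hget' : (pvCanon a b c).getD a' 0 = 100 := by
      rw [pvCanonGetD a b c a' (by omega)]; simp [show a' < a by omega]
    have hst2 : pvMergeStep (pvCanon a b c) ((0 + a' : ℕ) : Int) 200 = ((0 + a' : ℕ) : Int) := by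
      unfold pvMergeStep
      rw [if_neg]
      rintro ⟨_, hget⟩
      rw [PySem.List.pyGetD_natCast] at hget
      simp only [Nat.zero_add] at hget
      rw [hget'] at hget
      omega
    have hst3 : pvMergeStep (pvCanon a b c) ((0 + a' : ℕ) : Int) 300 = ((0 + a' : ℕ) : Int) := by
      unfold pvMergeStep
      rw [if_neg]
      rintro ⟨_, hget⟩
      rw [PySem.List.pyGetD_natCast] at hget
      simp only [Nat.zero_add] at hget
      rw [hget'] at hget
      omega
    rw [pvMergeStall _ _ _ _ hst2, pvMergeStall _ _ _ _ hst3, hlen]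
    constructor
    · intro h
      have : 0 + a' = a + b + c := by exact_mod_cast h
      omega
    · intro ⟨ha', _, _⟩; omega

-- canonical lists are equal iff their counts are
theorem pvCanonEqIff (a b c a' b' c' : ℕ) :
    pvCanon a b c = pvCanon a' b' c' ↔ (a = a' ∧ b = b' ∧ c = c') := by
  constructor
  · intro h
    obtain ⟨h1, h2, h3⟩ := pvCanonCount a b c
    obtain ⟨h1', h2', h3'⟩ := pvCanonCount a' b' c'
    refine ⟨?_, ?_, ?_⟩
    · rw [← h1, ← h1', h]
    · rw [← h2, ← h2', h]
    · rw [← h3, ← h3', h]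
  · rintro ⟨rfl, rfl, rfl⟩; rfl

-- B's sorted material list is the canonical list of the cell counts
theorem pvSortedMatsCanon (m : List (List Int)) :
    pvSortedMats m = pvCanon ((pvCeldas m).count 100) ((pvCeldas m).count 200)
      ((pvCeldas m).count 300) := by
  unfold pvSortedMats
  rw [pvFilterCeldas]
  rw [pvSortCanon _ (by
    intro x hx
    have := (List.mem_filter.mp hx).2
    simp [pvMats] at this
    tauto)]
  rw [List.count_filter (by simp [pvMats]), List.count_filter (by simp [pvMats]),
    List.count_filter (by simp [pvMats])]

-- ===== VERDICT (by name: the statement is the Claim_ definition above) =====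
theorem verificarCantidades_spec : Claim_equal_verificarCantidades := by
  intro mp ms _ _
  unfold Spec_verificarCantidades verificarCantidades verificarCantidades_alt
  simp only [pvAddLoop, pvSubLoop, pvSortedMatsCanon]
  set A1 := (pvCeldas mp).count 100 with hA1
  set B1 := (pvCeldas mp).count 200 with hB1
  set C1 := (pvCeldas mp).count 300 with hC1
  set A2 := (pvCeldas ms).count 100 with hA2
  set B2 := (pvCeldas ms).count 200 with hB2
  set C2 := (pvCeldas ms).count 300 with hC2
  simp only [Int.zero_add]
  by_cases heq : pvCanon A1 B1 C1 = pvCanon A2 B2 C2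
  · obtain ⟨e1, e2, e3⟩ := (pvCanonEqIff _ _ _ _ _ _).mp heq
    rw [if_pos heq, if_neg]
    rintro (h | h | h) <;> exact h (by omega)
  · rw [if_neg heq]
    have hne : ¬(A1 = A2 ∧ B1 = B2 ∧ C1 = C2) :=
      fun h => heq ((pvCanonEqIff _ _ _ _ _ _).mpr h)
    have hd : A1 ≠ A2 ∨ B1 ≠ B2 ∨ C1 ≠ C2 := by tauto
    rw [if_pos (by rcases hd with h | h | h <;> omega)]
    by_cases hle : A1 ≤ A2 ∧ B1 ≤ B2 ∧ C1 ≤ C2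
    · rw [if_pos ((pvMergeFull A1 B1 C1 A2 B2 C2).mpr hle), if_neg]
      obtain ⟨h1, h2, h3⟩ := hle
      omega
    · rw [if_neg (fun h => hle ((pvMergeFull A1 B1 C1 A2 B2 C2).mp h)), if_pos]
      have hx : A2 < A1 ∨ B2 < B1 ∨ C2 < C1 := by
        by_contra hc
        exact hle ⟨by omega, by omega, by omega⟩
      rcases hx with h | h | h <;> omega
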